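-- pv_equiv track=rewrite | github.com/and0ela/Area-Under-Curve-Estimator | home.py | formatFunction
-- ===== SOURCE A (Python) =====
-- def formatFunction(func):
--     form_func = func
--     elements = ["cos(","sin(","tan(","sec(","csc(","cot(","^","pi:"]
--     re_elements = ["math.cos(","math.sin(","math.tan(","1/math.cos(","1/math.sin(","1/math.tan(","**","math.pi"]
--     element_test = ["^"]
--     for i in range(len(elements)):
--         form_func = form_func.replace(elements[i],re_elements[i])
--     #st.write(form_func)
--     return(form_func)
-- ===== SOURCE B (Python) =====
-- def formatFunction(func):
--     mapping = {
--         "cos(": "math.cos(",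
--         "sin(": "math.sin(",
--         "tan(": "math.tan(",
--         "sec(": "1/math.cos(",
--         "csc(": "1/math.sin(",
--         "cot(": "1/math.tan(",
--         "^": "**",
--         "pi:": "math.pi",
--     }
--     out = []
--     i = 0
--     n = len(func)
--     while i < n:
--         for tok, rep in mapping.items():
--             if func.startswith(tok, i):
--                 out.append(rep)
--                 i += len(tok)
--                 break
--         else:
--             out.append(func[i])
--             i += 1
--     return "".join(out)
-- ===== Notes on version B (the rewrite author's own statement) =====
-- stated objective: alternative
-- what changed: Eight sequential full-string str.replace passes are replaced by a single left-to-right scan that consults a token-to-replacement table once per position and emits the output in one pass.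
import Mathlib
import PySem

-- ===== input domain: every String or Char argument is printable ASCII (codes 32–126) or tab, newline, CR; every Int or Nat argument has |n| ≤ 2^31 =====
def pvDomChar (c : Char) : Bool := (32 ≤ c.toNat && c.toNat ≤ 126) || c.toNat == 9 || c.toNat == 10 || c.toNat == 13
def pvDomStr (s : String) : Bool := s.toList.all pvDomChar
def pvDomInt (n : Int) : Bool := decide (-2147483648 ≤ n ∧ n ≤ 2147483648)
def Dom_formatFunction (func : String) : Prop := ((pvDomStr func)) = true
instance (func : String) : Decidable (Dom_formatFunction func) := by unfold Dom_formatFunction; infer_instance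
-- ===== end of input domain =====

-- B replaces A's eight sequential full-string replace passes by one left-to-right scan over
-- a token→replacement table (alternative single-pass structure; return value proved equal).

-- ===== PORT A =====
def formatFunction (func : String) : String :=
  let form_func := func
  let elements := ["cos(", "sin(", "tan(", "sec(", "csc(", "cot(", "^", "pi:"]
  let re_elements := ["math.cos(", "math.sin(", "math.tan(", "1/math.cos(", "1/math.sin(", "1/math.tan(", "**", "math.pi"]
  -- for i in range(len(elements)): form_func = form_func.replace(elements[i], re_elements[i])
  let form_func := (List.range elements.length).foldl
    (fun acc i => PySem.Str.replace acc (elements.getD i "") (re_elements.getD i "")) form_func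
  form_func

-- ===== PORT B =====
-- B's dict (insertion order) of token → replacement, as char lists.
def pvPairs : List (List Char × List Char) :=
  [(['c', 'o', 's', '('], ['m', 'a', 't', 'h', '.', 'c', 'o', 's', '(']),
   (['s', 'i', 'n', '('], ['m', 'a', 't', 'h', '.', 's', 'i', 'n', '(']),
   (['t', 'a', 'n', '('], ['m', 'a', 't', 'h', '.', 't', 'a', 'n', '(']),
   (['s', 'e', 'c', '('], ['1', '/', 'm', 'a', 't', 'h', '.', 'c', 'o', 's', '(']),
   (['c', 's', 'c', '('], ['1', '/', 'm', 'a', 't', 'h', '.', 's', 'i', 'n', '(']),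
   (['c', 'o', 't', '('], ['1', '/', 'm', 'a', 't', 'h', '.', 't', 'a', 'n', '(']),
   (['^'], ['*', '*']),
   (['p', 'i', ':'], ['m', 'a', 't', 'h', '.', 'p', 'i'])]

-- B's while-loop: at each position try the table entries in order; on a match emit the
-- replacement and skip the token, otherwise emit the character.  (Recursing on
-- t.drop (q.1.length - 1) is (c::t).drop q.1.length for the nonempty tokens B uses;
-- written this way only so that the recursion visibly shrinks the list.)
def pvScan (ps : List (List Char × List Char)) : List Char → List Char
  | [] => []
  | c :: t =>
    match ps.find? (fun q => q.1.isPrefixOf (c :: t)) with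
    | some q => q.2 ++ pvScan ps (t.drop (q.1.length - 1))
    | none => c :: pvScan ps t
termination_by l => l.length
decreasing_by
  · simp only [List.length_drop, List.length_cons]; omega
  · simp

def formatFunction_alt (func : String) : String :=
  String.ofList (pvScan pvPairs func.toList)

-- ===== PRECONDITION & SPEC =====
def Spec_formatFunction (func : String) (out : String) : Prop := out = formatFunction_alt func
instance (func : String) (out : String) : Decidable (Spec_formatFunction func out) := by unfold Spec_formatFunction; infer_instance

-- ===== CLAIM (what is proved, stated in full; the proofs are below) =====
def Claim_equal_formatFunction : Prop := ∀ (func : String), Dom_formatFunction func → Spec_formatFunction func (formatFunction func)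

-- ===== LEMMAS AND PROOFS =====

-- One replace pass, structurally (equals PySem.Chars.replace when the pattern is nonempty).
def pvRepl (o n : List Char) : List Char → List Char
  | [] => []
  | c :: t =>
    if o.isPrefixOf (c :: t) then n ++ pvRepl o n (t.drop (o.length - 1))
    else c :: pvRepl o n t
termination_by l => l.length
decreasing_by
  · simp only [List.length_drop, List.length_cons]; omega
  · simp

theorem pvGo_eq (o n : List Char) (ho : o ≠ []) :
    ∀ (fuel : Nat) (l acc : List Char), l.length ≤ fuel →
      PySem.Chars.replace.go o n fuel l acc = acc.reverse ++ pvRepl o n l := by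
  intro fuel
  induction fuel with
  | zero =>
    intro l acc hl
    have : l = [] := by cases l <;> simp_all
    subst this
    simp [PySem.Chars.replace.go, pvRepl]
  | succ fuel ih =>
    intro l acc hl
    cases l with
    | nil => simp [PySem.Chars.replace.go, pvRepl]
    | cons c t =>
      rw [PySem.Chars.replace.go]
      by_cases hp : o.isPrefixOf (c :: t)
      · rw [if_pos hp]
        have holen : 1 ≤ o.length := by cases o <;> simp_all
        have hdrop : (c :: t).drop o.length = t.drop (o.length - 1) := by
          cases ho' : o with
          | nil => exact absurd ho' ho
          | cons a b => simp
        rw [hdrop, ih (t.drop (o.length - 1)) (n.reverse ++ acc)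
            (by simp only [List.length_drop]; simp at hl; omega)]
        rw [pvRepl, if_pos hp]
        simp
      · rw [if_neg hp]
        rw [ih t (c :: acc) (by simp at hl; omega)]
        rw [pvRepl, if_neg hp]
        simp

theorem pvReplace_eq (o n s : List Char) (ho : o ≠ []) :
    PySem.Chars.replace s o n = pvRepl o n s := by
  rw [PySem.Chars.replace, if_neg (by simp [List.isEmpty_iff, ho])]
  simpa using pvGo_eq o n ho s.length s [] le_rfl

theorem pvPrefix_cases {α : Type} (o x z : List α) (h : o <+: x ++ z) : o <+: x ∨ x <+: o := by
  exact List.prefix_or_prefix_of_prefix h (List.prefix_append x z)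

theorem pvRepl_append (o n a z : List Char)
    (h : ∀ p, p < a.length → ¬ o <+: (a.drop p ++ z)) :
    pvRepl o n (a ++ z) = a ++ pvRepl o n z := by
  induction a with
  | nil => simp
  | cons c a' ih =>
    rw [List.cons_append, pvRepl, if_neg]
    · rw [ih (fun p hp => h (p + 1) (by simpa using Nat.succ_lt_succ hp))]
      simp
    · intro hp
      exact h 0 (by simp) (by simpa using (List.isPrefixOf_iff_prefix).1 hp)

theorem pvScan_nil (s : List Char) : pvScan [] s = s := by
  induction s with
  | nil => rw [pvScan]
  | cons c t ih => rw [pvScan]; simp [ih]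

theorem pvScan_cons_some (ps : List (List Char × List Char)) (c : Char) (t : List Char)
    (q : List Char × List Char)
    (hfind : List.find? (fun q => q.1.isPrefixOf (c :: t)) ps = some q) :
    pvScan ps (c :: t) = q.2 ++ pvScan ps (t.drop (q.1.length - 1)) := by
  rw [pvScan, hfind]

theorem pvScan_cons_none (ps : List (List Char × List Char)) (c : Char) (t : List Char)
    (hfind : List.find? (fun q => q.1.isPrefixOf (c :: t)) ps = none) :
    pvScan ps (c :: t) = c :: pvScan ps t := by
  rw [pvScan, hfind]

theorem pvScan_append (ps : List (List Char × List Char)) (a z : List Char)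
    (h : ∀ p, p < a.length → ∀ q ∈ ps, ¬ q.1 <+: (a.drop p ++ z)) :
    pvScan ps (a ++ z) = a ++ pvScan ps z := by
  induction a with
  | nil => simp
  | cons c a' ih =>
    rw [List.cons_append, pvScan]
    have hnone : ps.find? (fun q => q.1.isPrefixOf (c :: (a' ++ z))) = none := by
      rw [List.find?_eq_none]
      intro q hq
      simp only [Bool.not_eq_true]
      rw [Bool.eq_false_iff]
      intro hp
      exact h 0 (by simp) q hq (by simpa using (List.isPrefixOf_iff_prefix).1 hp)
    rw [hnone]
    rw [ih (fun p hp q hq => h (p + 1) (by simpa using Nat.succ_lt_succ hp) q hq)]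
    simp

theorem pvScan_prefix (ps : List (List Char × List Char)) (M : List Char)
    (hM : ∀ q ∈ ps, q.2.headI ∈ M ∧ q.2 ≠ []) :
    ∀ (s u : List Char), u <+: pvScan ps s → (∀ c ∈ u, c ∉ M) → u <+: s := by
  suffices h : ∀ (N : Nat) (s u : List Char), s.length ≤ N →
      u <+: pvScan ps s → (∀ c ∈ u, c ∉ M) → u <+: s by
    intro s u; exact h s.length s u le_rfl
  intro N
  induction N with
  | zero =>
    intro s u hs hu _
    have : s = [] := by cases s <;> simp_all
    subst this
    rw [pvScan] at hu
    simpa using hu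
  | succ N ih =>
    intro s u hs hu hum
    cases s with
    | nil => rw [pvScan] at hu; simpa using hu
    | cons c t =>
      cases hfind : List.find? (fun q => q.1.isPrefixOf (c :: t)) ps with
      | some q =>
        rw [pvScan_cons_some ps c t q hfind] at hu
        cases u with
        | nil => exact List.nil_prefix
        | cons d u' =>
          exfalso
          obtain ⟨hmM, hne⟩ := hM q (List.mem_of_find?_eq_some hfind)
          cases hq2 : q.2 with
          | nil => exact hne hq2
          | cons e r =>
            rw [hq2] at hu
            have hde := (List.cons_prefix_cons.1 hu).1
            apply hum d (by simp)
            rw [hde]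
            rw [hq2] at hmM
            simpa using hmM
      | none =>
        rw [pvScan_cons_none ps c t hfind] at hu
        cases u with
        | nil => exact List.nil_prefix
        | cons d u' =>
          obtain ⟨hd, hu'⟩ := List.cons_prefix_cons.1 hu
          subst hd
          exact List.cons_prefix_cons.2 ⟨rfl,
            ih t u' (by simp at hs; omega) hu' (fun c hc => hum c (by simp [hc]))⟩

theorem pvStep (ps : List (List Char × List Char)) (o n : List Char) (M : List Char)
    (ho : o ≠ [])
    (hoM : ∀ c ∈ o, c ∉ M)
    (hM : ∀ q ∈ ps, q.2.headI ∈ M ∧ q.2 ≠ [])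
    (hC2 : ∀ q ∈ ps, ∀ p, p < q.2.length → ¬ (q.2.drop p <+: o) ∧ ¬ (o <+: q.2.drop p))
    (hC3 : ∀ p, p < o.length → ∀ q ∈ ps, ¬ (q.1 <+: o.drop p) ∧ ¬ (o.drop p <+: q.1)) :
    ∀ s, pvRepl o n (pvScan ps s) = pvScan (ps ++ [(o, n)]) s := by
  suffices h : ∀ (N : Nat) (s : List Char), s.length ≤ N →
      pvRepl o n (pvScan ps s) = pvScan (ps ++ [(o, n)]) s by
    intro s; exact h s.length s le_rfl
  intro N
  induction N with
  | zero =>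
    intro s hs
    have : s = [] := by cases s <;> simp_all
    subst this
    rw [pvScan, pvScan, pvRepl]
  | succ N ih =>
    intro s hs
    cases s with
    | nil => rw [pvScan, pvScan, pvRepl]
    | cons c t =>
      have holen : 1 ≤ o.length := by cases o <;> simp_all
      cases hfind : List.find? (fun q => q.1.isPrefixOf (c :: t)) ps with
      | some q =>
        have hqmem := List.mem_of_find?_eq_some hfind
        rw [pvScan_cons_some ps c t q hfind]
        rw [pvScan_cons_some (ps ++ [(o, n)]) c t q
          (by rw [List.find?_append, hfind]; rfl)]
        rw [pvRepl_append o n q.2 (pvScan ps (t.drop (q.1.length - 1)))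
          (by
            intro p hp hpre
            rcases pvPrefix_cases _ _ _ hpre with h1 | h1
            · exact (hC2 q hqmem p hp).2 h1
            · exact (hC2 q hqmem p hp).1 h1)]
        rw [ih (t.drop (q.1.length - 1)) (by simp only [List.length_drop]; simp at hs; omega)]
      | none =>
        have hnone : ∀ q ∈ ps, ¬ q.1 <+: (c :: t) := by
          intro q hq hpre
          have := List.find?_eq_none.1 hfind q hq
          simp only [Bool.not_eq_true] at this
          rw [(List.isPrefixOf_iff_prefix).2 hpre] at this
          exact absurd this (by simp)
        by_cases ho2 : o <+: (c :: t)
        · obtain ⟨s'', hs''⟩ := ho2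
          have hsplit : pvScan ps (c :: t) = o ++ pvScan ps s'' := by
            rw [← hs'']
            exact pvScan_append ps o s'' (by
              intro p hp q hq hpre
              rcases pvPrefix_cases _ _ _ hpre with h1 | h1
              · exact (hC3 p hp q hq).1 h1
              · exact (hC3 p hp q hq).2 h1)
          rw [hsplit]
          cases ho' : o with
          | nil => exact absurd ho' ho
          | cons oc ot =>
            rw [List.cons_append, pvRepl, if_pos (by
              rw [List.isPrefixOf_iff_prefix, ← List.cons_append, ← ho']
              exact List.prefix_append o (pvScan ps s''))]
            have hdroplen : (oc :: ot).length - 1 = ot.length := by simp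
            rw [hdroplen, List.drop_append_of_le_length (by simp), List.drop_length,
              List.nil_append]
            have hslen : s''.length ≤ N := by
              have := congrArg List.length hs''
              simp [ho'] at this ⊢
              simp at hs
              omega
            rw [← ho', ih s'' hslen]
            -- RHS: new pair fires
            have hfind' : List.find? (fun q => q.1.isPrefixOf (c :: t)) (ps ++ [(o, n)])
                = some (o, n) := by
              rw [List.find?_append, hfind]
              simp only [Option.none_or]
              rw [List.find?_cons_of_pos]
              rw [List.isPrefixOf_iff_prefix, ← hs'']
              exact List.prefix_append o s''
            rw [pvScan_cons_some (ps ++ [(o, n)]) c t (o, n) hfind']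
            have hts : t.drop (o.length - 1) = s'' := by
              have h1 : (c :: t).drop o.length = s'' := by rw [← hs'']; simp
              rw [← h1]
              cases ho'' : o with
              | nil => exact absurd ho'' ho
              | cons a b => simp
            simp only [hts]
        · -- no pair matches at 0 at all
          rw [pvScan_cons_none ps c t hfind]
          rw [pvRepl, if_neg (by
            intro hp
            have hp' := (List.isPrefixOf_iff_prefix).1 hp
            apply ho2
            cases ho' : o with
            | nil => exact absurd ho' ho
            | cons oc ot =>
              rw [ho'] at hp'
              obtain ⟨hd, hu'⟩ := List.cons_prefix_cons.1 hp'
              subst hd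
              have hot : ot <+: t := by
                apply pvScan_prefix ps M hM t ot hu'
                intro x hx
                exact hoM x (by simp [ho', hx])
              exact List.cons_prefix_cons.2 ⟨rfl, hot⟩)]
          rw [ih t (by simp at hs; omega)]
          rw [pvScan_cons_none (ps ++ [(o, n)]) c t (by
            rw [List.find?_append, hfind]
            simp only [Option.none_or]
            rw [List.find?_cons_of_neg, List.find?_nil]
            simp only [Bool.not_eq_true]
            rw [Bool.eq_false_iff]
            intro hp
            exact ho2 ((List.isPrefixOf_iff_prefix).1 hp))]

-- markers: the characters every replacement starts with and no token contains
def pvM : List Char := ['m', '1', '*']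

set_option maxRecDepth 4000 in
theorem pvMain (l : List Char) :
    PySem.Chars.replace (PySem.Chars.replace (PySem.Chars.replace (PySem.Chars.replace
      (PySem.Chars.replace (PySem.Chars.replace (PySem.Chars.replace (PySem.Chars.replace l
      ['c', 'o', 's', '('] ['m', 'a', 't', 'h', '.', 'c', 'o', 's', '(']) ['s', 'i', 'n', '('] ['m', 'a', 't', 'h', '.', 's', 'i', 'n', '('])
      ['t', 'a', 'n', '('] ['m', 'a', 't', 'h', '.', 't', 'a', 'n', '(']) ['s', 'e', 'c', '('] ['1', '/', 'm', 'a', 't', 'h', '.', 'c', 'o', 's', '('])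
      ['c', 's', 'c', '('] ['1', '/', 'm', 'a', 't', 'h', '.', 's', 'i', 'n', '(']) ['c', 'o', 't', '('] ['1', '/', 'm', 'a', 't', 'h', '.', 't', 'a', 'n', '('])
      ['^'] ['*', '*']) ['p', 'i', ':'] ['m', 'a', 't', 'h', '.', 'p', 'i']
      = pvScan pvPairs l := by
  rw [pvReplace_eq (['c', 'o', 's', '(']) (['m', 'a', 't', 'h', '.', 'c', 'o', 's', '(']) _ (by decide)]
  rw [pvReplace_eq (['s', 'i', 'n', '(']) (['m', 'a', 't', 'h', '.', 's', 'i', 'n', '(']) _ (by decide)]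
  rw [pvReplace_eq (['t', 'a', 'n', '(']) (['m', 'a', 't', 'h', '.', 't', 'a', 'n', '(']) _ (by decide)]
  rw [pvReplace_eq (['s', 'e', 'c', '(']) (['1', '/', 'm', 'a', 't', 'h', '.', 'c', 'o', 's', '(']) _ (by decide)]
  rw [pvReplace_eq (['c', 's', 'c', '(']) (['1', '/', 'm', 'a', 't', 'h', '.', 's', 'i', 'n', '(']) _ (by decide)]
  rw [pvReplace_eq (['c', 'o', 't', '(']) (['1', '/', 'm', 'a', 't', 'h', '.', 't', 'a', 'n', '(']) _ (by decide)]
  rw [pvReplace_eq (['^']) (['*', '*']) _ (by decide)]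
  rw [pvReplace_eq (['p', 'i', ':']) (['m', 'a', 't', 'h', '.', 'p', 'i']) _ (by decide)]
  conv_lhs => rw [show l = pvScan [] l from (pvScan_nil l).symm]
  rw [pvStep [] (['c', 'o', 's', '(']) (['m', 'a', 't', 'h', '.', 'c', 'o', 's', '(']) pvM (by decide)
    (of_decide_eq_true (inst := List.decidableBAll _ _) rfl)
    (of_decide_eq_true (inst := List.decidableBAll _ _) rfl)
    (of_decide_eq_true (inst := List.decidableBAll _ _) rfl)
    (of_decide_eq_true (inst := Nat.decidableBallLT _ _) rfl) l]
  simp only [List.nil_append]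
  rw [pvStep [(['c', 'o', 's', '('], ['m', 'a', 't', 'h', '.', 'c', 'o', 's', '('])]
    (['s', 'i', 'n', '(']) (['m', 'a', 't', 'h', '.', 's', 'i', 'n', '(']) pvM (by decide)
    (of_decide_eq_true (inst := List.decidableBAll _ _) rfl)
    (of_decide_eq_true (inst := List.decidableBAll _ _) rfl)
    (of_decide_eq_true (inst := List.decidableBAll _ _) rfl)
    (of_decide_eq_true (inst := Nat.decidableBallLT _ _) rfl) l]
  simp only [List.nil_append, List.cons_append]
  rw [pvStep [(['c', 'o', 's', '('], ['m', 'a', 't', 'h', '.', 'c', 'o', 's', '(']), (['s', 'i', 'n', '('], ['m', 'a', 't', 'h', '.', 's', 'i', 'n', '('])]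
    (['t', 'a', 'n', '(']) (['m', 'a', 't', 'h', '.', 't', 'a', 'n', '(']) pvM (by decide)
    (of_decide_eq_true (inst := List.decidableBAll _ _) rfl)
    (of_decide_eq_true (inst := List.decidableBAll _ _) rfl)
    (of_decide_eq_true (inst := List.decidableBAll _ _) rfl)
    (of_decide_eq_true (inst := Nat.decidableBallLT _ _) rfl) l]
  simp only [List.nil_append, List.cons_append]
  rw [pvStep [(['c', 'o', 's', '('], ['m', 'a', 't', 'h', '.', 'c', 'o', 's', '(']), (['s', 'i', 'n', '('], ['m', 'a', 't', 'h', '.', 's', 'i', 'n', '(']),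
    (['t', 'a', 'n', '('], ['m', 'a', 't', 'h', '.', 't', 'a', 'n', '('])]
    (['s', 'e', 'c', '(']) (['1', '/', 'm', 'a', 't', 'h', '.', 'c', 'o', 's', '(']) pvM (by decide)
    (of_decide_eq_true (inst := List.decidableBAll _ _) rfl)
    (of_decide_eq_true (inst := List.decidableBAll _ _) rfl)
    (of_decide_eq_true (inst := List.decidableBAll _ _) rfl)
    (of_decide_eq_true (inst := Nat.decidableBallLT _ _) rfl) l]
  simp only [List.nil_append, List.cons_append]
  rw [pvStep [(['c', 'o', 's', '('], ['m', 'a', 't', 'h', '.', 'c', 'o', 's', '(']), (['s', 'i', 'n', '('], ['m', 'a', 't', 'h', '.', 's', 'i', 'n', '(']),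
    (['t', 'a', 'n', '('], ['m', 'a', 't', 'h', '.', 't', 'a', 'n', '(']), (['s', 'e', 'c', '('], ['1', '/', 'm', 'a', 't', 'h', '.', 'c', 'o', 's', '('])]
    (['c', 's', 'c', '(']) (['1', '/', 'm', 'a', 't', 'h', '.', 's', 'i', 'n', '(']) pvM (by decide)
    (of_decide_eq_true (inst := List.decidableBAll _ _) rfl)
    (of_decide_eq_true (inst := List.decidableBAll _ _) rfl)
    (of_decide_eq_true (inst := List.decidableBAll _ _) rfl)
    (of_decide_eq_true (inst := Nat.decidableBallLT _ _) rfl) l]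
  simp only [List.nil_append, List.cons_append]
  rw [pvStep [(['c', 'o', 's', '('], ['m', 'a', 't', 'h', '.', 'c', 'o', 's', '(']), (['s', 'i', 'n', '('], ['m', 'a', 't', 'h', '.', 's', 'i', 'n', '(']),
    (['t', 'a', 'n', '('], ['m', 'a', 't', 'h', '.', 't', 'a', 'n', '(']), (['s', 'e', 'c', '('], ['1', '/', 'm', 'a', 't', 'h', '.', 'c', 'o', 's', '(']),
    (['c', 's', 'c', '('], ['1', '/', 'm', 'a', 't', 'h', '.', 's', 'i', 'n', '('])]
    (['c', 'o', 't', '(']) (['1', '/', 'm', 'a', 't', 'h', '.', 't', 'a', 'n', '(']) pvM (by decide)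
    (of_decide_eq_true (inst := List.decidableBAll _ _) rfl)
    (of_decide_eq_true (inst := List.decidableBAll _ _) rfl)
    (of_decide_eq_true (inst := List.decidableBAll _ _) rfl)
    (of_decide_eq_true (inst := Nat.decidableBallLT _ _) rfl) l]
  simp only [List.nil_append, List.cons_append]
  rw [pvStep [(['c', 'o', 's', '('], ['m', 'a', 't', 'h', '.', 'c', 'o', 's', '(']), (['s', 'i', 'n', '('], ['m', 'a', 't', 'h', '.', 's', 'i', 'n', '(']),
    (['t', 'a', 'n', '('], ['m', 'a', 't', 'h', '.', 't', 'a', 'n', '(']), (['s', 'e', 'c', '('], ['1', '/', 'm', 'a', 't', 'h', '.', 'c', 'o', 's', '(']),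
    (['c', 's', 'c', '('], ['1', '/', 'm', 'a', 't', 'h', '.', 's', 'i', 'n', '(']), (['c', 'o', 't', '('], ['1', '/', 'm', 'a', 't', 'h', '.', 't', 'a', 'n', '('])]
    (['^']) (['*', '*']) pvM (by decide)
    (of_decide_eq_true (inst := List.decidableBAll _ _) rfl)
    (of_decide_eq_true (inst := List.decidableBAll _ _) rfl)
    (of_decide_eq_true (inst := List.decidableBAll _ _) rfl)
    (of_decide_eq_true (inst := Nat.decidableBallLT _ _) rfl) l]
  simp only [List.nil_append, List.cons_append]
  rw [pvStep [(['c', 'o', 's', '('], ['m', 'a', 't', 'h', '.', 'c', 'o', 's', '(']), (['s', 'i', 'n', '('], ['m', 'a', 't', 'h', '.', 's', 'i', 'n', '(']),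
    (['t', 'a', 'n', '('], ['m', 'a', 't', 'h', '.', 't', 'a', 'n', '(']), (['s', 'e', 'c', '('], ['1', '/', 'm', 'a', 't', 'h', '.', 'c', 'o', 's', '(']),
    (['c', 's', 'c', '('], ['1', '/', 'm', 'a', 't', 'h', '.', 's', 'i', 'n', '(']), (['c', 'o', 't', '('], ['1', '/', 'm', 'a', 't', 'h', '.', 't', 'a', 'n', '(']),
    (['^'], ['*', '*'])]
    (['p', 'i', ':']) (['m', 'a', 't', 'h', '.', 'p', 'i']) pvM (by decide)
    (of_decide_eq_true (inst := List.decidableBAll _ _) rfl)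
    (of_decide_eq_true (inst := List.decidableBAll _ _) rfl)
    (of_decide_eq_true (inst := List.decidableBAll _ _) rfl)
    (of_decide_eq_true (inst := Nat.decidableBallLT _ _) rfl) l]
  rfl

-- ===== VERDICT (by name: the statement is the Claim_ definition above) =====
theorem formatFunction_spec : Claim_equal_formatFunction := by
  intro func _
  unfold Spec_formatFunction formatFunction formatFunction_alt
  apply String.toList_inj.mp
  have hr : List.range 8 = [0, 1, 2, 3, 4, 5, 6, 7] := rfl
  simp only [List.length_cons, List.length_nil, hr, List.foldl_cons, List.foldl_nil,
    List.getD_cons_zero, List.getD_cons_succ, PySem.Str.toList_replace, String.toList_ofList]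
  exact pvMain func.toList
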